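-- pv_equiv track=rewrite | github.com/Tuchis/OP1 | LAB 4/lab_22.py | pattern_number
-- ===== SOURCE A (Python) =====
-- def pattern_number(sequence):
--     """
--     >>> pattern_number([])
--     None
--     >>> pattern_number([42])
--     None
--     >>> pattern_number([1,2])
--     None
--     >>> pattern_number([1,1])
--     ([1], 2)
--     >>> pattern_number([1,2,1])
--     None
--     >>> pattern_number([1,2,3,1,2,3])
--     ([1,2,3], 2)
--     >>> pattern_number([1,2,3,1,2])
--     None
--     >>> pattern_number([1,2,3,1,2,3,1])
--     None
--     >>> pattern_number(list(range(10))*20)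
--     ([0, 1, 2, 3, 4, 5, 6, 7, 8, 9], 20)
--     >>> pattern_number('мама')
--     ('ма', 2)
--     >>> pattern_number('барабан')
--     None
--     """
--
--     for i in range(len(sequence) // 2):
--         seq = sequence[0:i+1]
--         if type(sequence) == list:
--             timed_sequence = sequence.copy()
--         else:
--             timed_sequence = sequence
--         variable = True
--         counter = 0
--         while len(timed_sequence) > 0:
--             if variable == False:
--                 break
--             count = 0
--             variable = 0
--             for j in seq:
--                 if j == timed_sequence[count]:
--                     count += 1
--                     variable = True
--                     pass
--                 else:
--                     variable = False
--                     break
--             if variable == True: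
--                 for _ in range(len(seq)):
--                     if type(sequence) == list:
--                         timed_sequence.pop(0)
--                     else:
--                         timed_sequence = timed_sequence[1:]
--                 counter += 1
--             else:
--                 continue
--         if len(timed_sequence) == 0:
--             return seq, counter
--     return None
-- ===== SOURCE B (Python) =====
-- def pattern_number(sequence):
--     n = len(sequence)
--     for p in range(1, n // 2 + 1):
--         if n % p == 0 and all(sequence[i] == sequence[i % p] for i in range(p, n)):
--             return sequence[:p], n // p
--     return None
-- ===== Notes on version B (the rewrite author's own statement) =====
-- stated objective: faster
-- what changed: Instead of A's repeated copy/pop(0) chunk-stripping while-loop per candidate prefix, B checks each candidate period p directly: p must divide n and every element must equal the one p positions into the prefix (one modular-index pass), returning the first such p.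
import Mathlib
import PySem

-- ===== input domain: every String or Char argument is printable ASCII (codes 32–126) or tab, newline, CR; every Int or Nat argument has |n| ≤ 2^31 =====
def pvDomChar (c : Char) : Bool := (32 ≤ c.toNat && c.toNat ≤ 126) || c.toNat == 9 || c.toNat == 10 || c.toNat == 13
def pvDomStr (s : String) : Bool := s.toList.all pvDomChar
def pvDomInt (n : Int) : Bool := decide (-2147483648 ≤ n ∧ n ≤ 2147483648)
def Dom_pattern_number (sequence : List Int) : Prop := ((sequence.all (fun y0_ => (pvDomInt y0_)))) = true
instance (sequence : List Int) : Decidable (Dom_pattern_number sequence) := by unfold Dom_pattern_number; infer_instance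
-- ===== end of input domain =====

-- B replaces A's repeated copy/pop(0) chunk-stripping per candidate prefix by a direct divisor-period
-- check (one modular-index pass per candidate), for speed; equivalence is claimed on Pre_ (the inputs
-- where the Python A returns instead of raising IndexError).

-- ===== PORT A =====
-- inner `for j in seq` loop: compares seq against timed_sequence starting at index `count`;
-- returns the final `variable`; `none` = IndexError from timed_sequence[count] (outside Pre_).
def forLoopA (timed : List Int) : List Int → Nat → Bool → Option Bool
  | [], _, v => some v
  | j :: rest, count, _ =>
    match PySem.List.pyGet? timed (count : Int) with
    | none => none
    | some x => if j = x then forLoopA timed rest (count + 1) true else some false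

-- the `while len(timed_sequence) > 0` loop; the `variable == False: break` after a `continue`
-- is folded into the `some false` return (the loop re-enters once and breaks immediately);
-- `timed_sequence.pop(0)` repeated len(seq) times is `drop seq.length`;
-- fuel-structural: called with fuel > len(timed), enough since every iteration drops ≥ 1 element.
def whileRunA (seq : List Int) : Nat → List Int → Int → Option (List Int × Int)
  | 0, timed, counter => some (timed, counter)
  | fuel + 1, timed, counter =>
    if timed = [] then some (timed, counter)
    else
      match forLoopA timed seq 0 false with
      | none => none
      | some true => whileRunA seq fuel (timed.drop seq.length) (counter + 1)
      | some false => some (timed, counter)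

-- the `for i in range(len(sequence)//2)` loop; fuel-structural with fuel > n//2 - i.
def outerA (xs : List Int) : Nat → Nat → Option (List Int × Int)
  | 0, _ => none
  | fuel + 1, i =>
    if i < xs.length / 2 then
      match whileRunA (PySem.List.slice xs (some 0) (some ((i : Int) + 1))) (xs.length + 1) xs 0 with
      | none => none  -- IndexError in the Python; only reachable outside Pre_
      | some (timed, counter) =>
        if timed = [] then some (PySem.List.slice xs (some 0) (some ((i : Int) + 1)), counter)
        else outerA xs fuel (i + 1)
    else none

def pattern_number (sequence : List Int) : Option (List Int × Int) :=
  outerA sequence (sequence.length / 2 + 1) 0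

-- ===== PORT B =====
-- all(sequence[i] == sequence[i % p] for i in range(p, n))  (indices p..n-1, all in range)
def checkB (xs : List Int) (p : Nat) : Bool :=
  (List.range' p (xs.length - p)).all fun i => xs.getD i 0 == xs.getD (i % p) 0

-- for p in range(1, n//2 + 1); fuel-structural with fuel > n//2 - p + 1.
def loopB (xs : List Int) : Nat → Nat → Option (List Int × Int)
  | 0, _ => none
  | fuel + 1, p =>
    if p ≤ xs.length / 2 then
      if xs.length % p == 0 && checkB xs p then
        some (xs.take p, ((xs.length / p : Nat) : Int))
      else loopB xs fuel (p + 1)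
    else none

def pattern_number_alt (sequence : List Int) : Option (List Int × Int) :=
  loopB sequence (sequence.length / 2 + 1) 1

-- ===== PRECONDITION & SPEC =====
-- "xs has weak period p": every element equals the one at its index reduced mod p.
abbrev Pwp (xs : List Int) (p : Nat) : Prop :=
  ∀ i, i < xs.length → xs.getD i 0 = xs.getD (i % p) 0

-- Pre_ excludes exactly the inputs on which the Python A raises IndexError: those whose
-- smallest weak period p ≤ n//2 fails to divide n (A then indexes past the short final chunk).
def Pre_pattern_number (sequence : List Int) : Prop :=
  ∀ p, p < sequence.length / 2 + 1 → 0 < p → Pwp sequence p →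
    p ∣ sequence.length ∨ ∃ q, q < p ∧ 0 < q ∧ Pwp sequence q

instance (sequence : List Int) : Decidable (Pre_pattern_number sequence) := by
  unfold Pre_pattern_number; infer_instance

def pvWitness_pattern_number : List Int := [1, 1]

def Spec_pattern_number (sequence : List Int) (out : Option (List Int × Int)) : Prop := out = pattern_number_alt sequence
instance (sequence : List Int) (out : Option (List Int × Int)) : Decidable (Spec_pattern_number sequence out) := by unfold Spec_pattern_number; infer_instance

-- ===== CLAIM (what is proved, stated in full; the proofs are below) =====
def Claim_equal_pattern_number : Prop := ∀ (sequence : List Int), Dom_pattern_number sequence → Pre_pattern_number sequence → Spec_pattern_number sequence (pattern_number sequence)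

-- ===== LEMMAS AND PROOFS =====

lemma getD_drop_add (xs : List Int) (a m : Nat) (h : a + m < xs.length) :
    (xs.drop a).getD m 0 = xs.getD (a + m) 0 := by
  rw [List.getD_eq_getElem _ _ (by simp only [List.length_drop]; omega),
      List.getD_eq_getElem _ _ h]
  exact List.getElem_drop

lemma getD_take_lt (xs : List Int) (p m : Nat) (h : m < p) (h2 : m < xs.length) :
    (xs.take p).getD m 0 = xs.getD m 0 := by
  rw [List.getD_eq_getElem _ _ (by simp only [List.length_take]; omega),
      List.getD_eq_getElem _ _ h2]
  exact List.getElem_take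

lemma mul_add_mod_lt (k p m : Nat) (h : m < p) : (k * p + m) % p = m := by
  rw [Nat.mul_add_mod']; exact Nat.mod_eq_of_lt h

lemma forLoopA_match (timed : List Int) (seq : List Int) :
    ∀ (c : Nat) (v : Bool),
      c + seq.length ≤ timed.length →
      (∀ m, m < seq.length → timed.getD (c + m) 0 = seq.getD m 0) →
      forLoopA timed seq c v = some (if seq.isEmpty then v else true) := by
  induction seq with
  | nil => intro c v _ _; simp [forLoopA]
  | cons j rest ih =>
    intro c v hlen hm
    have hc : c < timed.length := by simp only [List.length_cons] at hlen; omega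
    have hj : timed[c] = j := by
      have h0 := hm 0 (by simp)
      rw [List.getD_eq_getElem _ _ (by omega)] at h0
      simpa using h0
    have hrec := ih (c + 1) true
      (by simp only [List.length_cons] at hlen; omega)
      (fun m hmlt => by
        have := hm (m + 1) (by simp only [List.length_cons]; omega)
        simpa [Nat.add_assoc, Nat.add_comm 1 m] using this)
    simp only [forLoopA, PySem.List.pyGet?_natCast, List.getElem?_eq_getElem hc, hj]
    simp only [hrec]
    simp

lemma forLoopA_mismatch (timed : List Int) (seq : List Int) :
    ∀ (c m0 : Nat) (v : Bool),
      m0 < seq.length → c + m0 < timed.length →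
      (∀ m, m < m0 → timed.getD (c + m) 0 = seq.getD m 0) →
      timed.getD (c + m0) 0 ≠ seq.getD m0 0 →
      forLoopA timed seq c v = some false := by
  induction seq with
  | nil => intro c m0 v h; simp at h
  | cons j rest ih =>
    intro c m0 v hm0 hr hmatch hne
    have hc : c < timed.length := by omega
    cases m0 with
    | zero =>
      have hj : ¬ j = timed[c] := by
        intro hEq
        apply hne
        rw [List.getD_eq_getElem _ _ (by omega)]
        simp [← hEq]
      simp only [forLoopA, PySem.List.pyGet?_natCast, List.getElem?_eq_getElem hc]
      simp [hj]
    | succ m0' =>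
      have hj : timed[c] = j := by
        have h0 := hmatch 0 (by omega)
        rw [List.getD_eq_getElem _ _ (by omega)] at h0
        simpa using h0
      have hrec := ih (c + 1) m0' true
        (by simp only [List.length_cons] at hm0; omega)
        (by omega)
        (fun m hmlt => by
          have := hmatch (m + 1) (by omega)
          simpa [Nat.add_assoc, Nat.add_comm 1 m] using this)
        (by
          have : c + (m0' + 1) = c + 1 + m0' := by omega
          rw [this] at hne
          simpa using hne)
      simp only [forLoopA, PySem.List.pyGet?_natCast, List.getElem?_eq_getElem hc, hj]
      simpa using hrec

lemma length_take_eq (xs : List Int) (p : Nat) (hpn : p ≤ xs.length) :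
    (xs.take p).length = p := by
  simp [List.length_take]; omega

lemma take_isEmpty_false (xs : List Int) (p : Nat) (_hp : 0 < p) (hpn : p ≤ xs.length) :
    (xs.take p).isEmpty = false := by
  rw [List.isEmpty_eq_false_iff_exists_mem]
  have hl : (xs.take p).length = p := length_take_eq xs p hpn
  exact List.exists_mem_of_length_pos (by omega)

-- full-period case: the while loop strips all n/p chunks and empties the sequence
lemma whileRunA_pwp (xs : List Int) (p : Nat) (hp : 0 < p) (hpn : p ≤ xs.length)
    (hdvd : p ∣ xs.length) (hpwp : Pwp xs p) :
    ∀ (fuel k : Nat), k ≤ xs.length / p → xs.length - k * p < fuel →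
      whileRunA (xs.take p) fuel (xs.drop (k * p)) (k : Int)
        = some ([], ((xs.length / p : Nat) : Int)) := by
  intro fuel
  induction fuel with
  | zero => intro k _ hf; omega
  | succ f ihf =>
    intro k hk hf
    by_cases hke : k = xs.length / p
    · have hkp : k * p = xs.length := by
        rw [hke, Nat.div_mul_cancel hdvd]
      have hnil : xs.drop (k * p) = [] := by
        rw [hkp, List.drop_length]
      rw [hnil]
      simp [whileRunA, hke]
    · have hklt : k < xs.length / p := lt_of_le_of_ne hk hke
      have hk1 : (k + 1) * p ≤ xs.length := by
        calc (k + 1) * p ≤ (xs.length / p) * p := Nat.mul_le_mul_right p hklt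
        _ ≤ xs.length := Nat.div_mul_le_self _ _
      have hkp_lt : k * p < xs.length := by
        have : (k + 1) * p = k * p + p := by ring
        omega
      have hlen_drop : (xs.drop (k * p)).length = xs.length - k * p := by
        simp [List.length_drop]
      have htne : xs.drop (k * p) ≠ [] := by
        intro h
        rw [← List.length_eq_zero_iff] at h
        omega
      have hmatch : forLoopA (xs.drop (k * p)) (xs.take p) 0 false = some true := by
        rw [forLoopA_match]
        · rw [take_isEmpty_false xs p hp hpn]; rfl
        · rw [length_take_eq xs p hpn, hlen_drop]
          have : (k + 1) * p = k * p + p := by ring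
          omega
        · intro m hm
          rw [length_take_eq xs p hpn] at hm
          have hidx : k * p + m < xs.length := by
            have : (k + 1) * p = k * p + p := by ring
            omega
          rw [Nat.zero_add, getD_drop_add xs (k * p) m hidx,
              getD_take_lt xs p m hm (by omega)]
          have := hpwp (k * p + m) hidx
          rwa [mul_add_mod_lt k p m hm] at this
      rw [whileRunA]
      rw [if_neg htne, hmatch]
      have hdd : (xs.drop (k * p)).drop (xs.take p).length = xs.drop ((k + 1) * p) := by
        rw [length_take_eq xs p hpn, List.drop_drop]
        congr 1
        ring
      rw [hdd]
      have hcast : (k : Int) + 1 = ((k + 1 : Nat) : Int) := by push_cast; ring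
      rw [hcast]
      exact ihf (k + 1) hklt (by
        have : (k + 1) * p = k * p + p := by ring
        omega)

-- mismatch case: the while loop stalls on a non-empty remainder (i0 = least failing index)
lemma whileRunA_stuck (xs : List Int) (p i0 : Nat) (hp : 0 < p) (hpn : p ≤ xs.length)
    (hi0 : i0 < xs.length) (hne : xs.getD i0 0 ≠ xs.getD (i0 % p) 0)
    (hmin : ∀ j, j < i0 → xs.getD j 0 = xs.getD (j % p) 0) :
    ∀ (fuel k : Nat), k * p ≤ i0 → xs.length - k * p < fuel →
      ∃ t c, whileRunA (xs.take p) fuel (xs.drop (k * p)) (k : Int) = some (t, c) ∧ t ≠ [] := by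
  intro fuel
  induction fuel with
  | zero => intro k _ hf; omega
  | succ f ihf =>
    intro k hk hf
    have hkp_lt : k * p < xs.length := by omega
    have hlen_drop : (xs.drop (k * p)).length = xs.length - k * p := by
      simp [List.length_drop]
    have htne : xs.drop (k * p) ≠ [] := by
      intro h
      rw [← List.length_eq_zero_iff] at h
      omega
    have hk1 : (k + 1) * p = k * p + p := by ring
    by_cases hcase : (k + 1) * p ≤ i0
    · -- this chunk still matches; recurse
      have hmatch : forLoopA (xs.drop (k * p)) (xs.take p) 0 false = some true := by
        rw [forLoopA_match]
        · rw [take_isEmpty_false xs p hp hpn]; rfl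
        · rw [length_take_eq xs p hpn, hlen_drop]; omega
        · intro m hm
          rw [length_take_eq xs p hpn] at hm
          have hidx : k * p + m < xs.length := by omega
          rw [Nat.zero_add, getD_drop_add xs (k * p) m hidx,
              getD_take_lt xs p m hm (by omega)]
          have := hmin (k * p + m) (by omega)
          rwa [mul_add_mod_lt k p m hm] at this
      rw [whileRunA, if_neg htne, hmatch]
      have hdd : (xs.drop (k * p)).drop (xs.take p).length = xs.drop ((k + 1) * p) := by
        rw [length_take_eq xs p hpn, List.drop_drop]
        congr 1
        ring
      rw [hdd]
      have hcast : (k : Int) + 1 = ((k + 1 : Nat) : Int) := by push_cast; ring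
      rw [hcast]
      exact ihf (k + 1) hcase (by omega)
    · -- mismatch inside this chunk; the loop returns the non-empty remainder
      have hm0lt : i0 - k * p < p := by omega
      have hmis : forLoopA (xs.drop (k * p)) (xs.take p) 0 false = some false := by
        apply forLoopA_mismatch (xs.drop (k * p)) (xs.take p) 0 (i0 - k * p) false
        · rw [length_take_eq xs p hpn]; omega
        · rw [hlen_drop]; omega
        · intro m hm
          have hidx : k * p + m < xs.length := by omega
          rw [Nat.zero_add, getD_drop_add xs (k * p) m hidx,
              getD_take_lt xs p m (by omega) (by omega)]
          have := hmin (k * p + m) (by omega)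
          rwa [mul_add_mod_lt k p m (by omega)] at this
        · have hi0eq : k * p + (i0 - k * p) = i0 := by omega
          have hmod : i0 % p = i0 - k * p := by
            conv_lhs => rw [← hi0eq]
            exact mul_add_mod_lt k p (i0 - k * p) hm0lt
          rw [Nat.zero_add, getD_drop_add xs (k * p) (i0 - k * p) (by omega),
              getD_take_lt xs p (i0 - k * p) hm0lt (by omega), hi0eq, ← hmod]
          exact hne
      rw [whileRunA, if_neg htne, hmis]
      exact ⟨xs.drop (k * p), (k : Int), rfl, htne⟩

lemma checkB_iff (xs : List Int) (p : Nat) (_hp : 0 < p) :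
    checkB xs p = true ↔ Pwp xs p := by
  unfold checkB
  rw [List.all_eq_true]
  constructor
  · intro h i hi
    by_cases hip : i < p
    · rw [Nat.mod_eq_of_lt hip]
    · have hmem : i ∈ List.range' p (xs.length - p) :=
        List.mem_range'_1.mpr ⟨by omega, by omega⟩
      have := h i hmem
      exact beq_iff_eq.mp this
  · intro h i hi
    have hmem := List.mem_range'_1.mp hi
    exact beq_iff_eq.mpr (h i (by omega))

lemma slice_take (xs : List Int) (i : Nat) :
    PySem.List.slice xs (some 0) (some ((i : Int) + 1)) = xs.take (i + 1) := by
  rw [PySem.List.slice_toNat xs (a := 0) (b := (i : Int) + 1) (by omega) (by omega)]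
  have h2 : (((i : Int)) + 1).toNat = i + 1 := by omega
  simp [h2]

-- main loop correspondence: A's index loop and B's period loop advance in lockstep
lemma outerA_eq_loopB (xs : List Int) (hPre : Pre_pattern_number xs) :
    ∀ (fuel i : Nat), (∀ q, 0 < q → q ≤ i → ¬ Pwp xs q) →
      outerA xs fuel i = loopB xs fuel (i + 1) := by
  intro fuel
  induction fuel with
  | zero => intro i _; simp [outerA, loopB]
  | succ f ihf =>
    intro i hprev
    by_cases hi : i < xs.length / 2
    · have hp : 0 < i + 1 := by omega
      have hple : i + 1 ≤ xs.length / 2 := by omega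
      have h2p : i + 1 ≤ xs.length := by
        have := Nat.div_le_self xs.length 2
        omega
      rw [outerA, if_pos hi, slice_take]
      rw [loopB, if_pos hple]
      by_cases hpwp : Pwp xs (i + 1)
      · have hdvd : (i + 1) ∣ xs.length := by
          rcases hPre (i + 1) (by omega) hp hpwp with h | ⟨q, hq1, hq2, hq3⟩
          · exact h
          · exact absurd hq3 (hprev q hq2 (by omega))
        have hrun := whileRunA_pwp xs (i + 1) hp h2p hdvd hpwp (xs.length + 1) 0
          (Nat.zero_le _) (by omega)
        simp only [Nat.zero_mul, List.drop_zero, Nat.cast_zero] at hrun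
        rw [hrun]
        have hc : checkB xs (i + 1) = true := (checkB_iff xs (i + 1) hp).mpr hpwp
        have hmod : xs.length % (i + 1) = 0 := by
          obtain ⟨m, hm⟩ := hdvd
          rw [hm]
          exact Nat.mul_mod_right _ _
        simp [hmod, hc]
      · have hex : ∃ j, j < xs.length ∧ xs.getD j 0 ≠ xs.getD (j % (i + 1)) 0 := by
          obtain ⟨j, hj⟩ := not_forall.mp hpwp
          obtain ⟨h1, h2⟩ := Classical.not_imp.mp hj
          exact ⟨j, h1, h2⟩
        obtain ⟨hj0n, hj0ne⟩ := Nat.find_spec hex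
        have hmin : ∀ j, j < Nat.find hex → xs.getD j 0 = xs.getD (j % (i + 1)) 0 := by
          intro j hj
          by_contra hcon
          exact Nat.find_min hex hj ⟨by omega, hcon⟩
        obtain ⟨t, c, hrun, htne⟩ :=
          whileRunA_stuck xs (i + 1) (Nat.find hex) hp h2p hj0n hj0ne hmin
            (xs.length + 1) 0 (by omega) (by omega)
        simp only [Nat.zero_mul, List.drop_zero, Nat.cast_zero] at hrun
        have hc : checkB xs (i + 1) = false := by
          cases hcb : checkB xs (i + 1)
          · rfl
          · exact absurd ((checkB_iff xs (i + 1) hp).mp hcb) hpwp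
        have hnext : ∀ q, 0 < q → q ≤ i + 1 → ¬ Pwp xs q := by
          intro q hq0 hq1
          by_cases hqe : q = i + 1
          · rw [hqe]; exact hpwp
          · exact hprev q hq0 (by omega)
        have hihf := ihf (i + 1) hnext
        rw [hrun]
        simp [htne, hc, hihf]
    · rw [outerA, if_neg hi, loopB, if_neg (by omega)]

-- ===== VERDICT (by name: the statement is the Claim_ definition above) =====
theorem pattern_number_spec : Claim_equal_pattern_number := by
  intro xs _ hPre
  unfold Spec_pattern_number pattern_number pattern_number_alt
  exact outerA_eq_loopB xs hPre (xs.length / 2 + 1) 0 (fun q hq0 hq1 => by omega)
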